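-- pv_equiv track=rewrite | github.com/fenqyy/ssi | Ssi/K_srednia.py | analiza_grup
-- ===== SOURCE A (Python) =====
-- def analiza_grup(grupy):
--     raport = []
--     for idx, grupa in enumerate(grupy):
--         if grupa:
--             x1_min = min(p[0] for p in grupa)
--             x1_max = max(p[0] for p in grupa)
--             x2_min = min(p[1] for p in grupa)
--             x2_max = max(p[1] for p in grupa)
--             raport.append({
--                 "grupa": idx + 1,
--                 "liczba_prob": len(grupa),
--                 "x1_min": x1_min,
--                 "x1_max": x1_max,
--                 "x2_min": x2_min,
--                 "x2_max": x2_max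
--             })
--         else:
--             raport.append({
--                 "grupa": idx + 1,
--                 "liczba_prob": 0,
--                 "x1_min": None,
--                 "x1_max": None,
--                 "x2_min": None,
--                 "x2_max": None
--             })
--     return raport
-- ===== SOURCE B (Python) =====
-- def _raport_grupy(nr, grupa):
--     if not grupa:
--         return {"grupa": nr, "liczba_prob": 0,
--                 "x1_min": None, "x1_max": None, "x2_min": None, "x2_max": None}
--     mn1 = mx1 = grupa[0][0]
--     mn2 = mx2 = grupa[0][1]
--     for p in grupa[1:]:
--         if p[0] < mn1: mn1 = p[0]
--         if p[0] > mx1: mx1 = p[0]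
--         if p[1] < mn2: mn2 = p[1]
--         if p[1] > mx2: mx2 = p[1]
--     return {"grupa": nr, "liczba_prob": len(grupa),
--             "x1_min": mn1, "x1_max": mx1, "x2_min": mn2, "x2_max": mx2}
--
-- def analiza_grup(grupy):
--     return [_raport_grupy(i + 1, g) for i, g in enumerate(grupy)]
-- ===== Notes on version B (the rewrite author's own statement) =====
-- stated objective: alternative
-- what changed: Replaces the four separate min/max generator scans per group with a single combined pass maintaining all four extrema in one set of accumulators seeded from the first point, and builds the report by mapping a per-group helper over enumerate instead of appending inside a loop.
import Mathlib
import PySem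

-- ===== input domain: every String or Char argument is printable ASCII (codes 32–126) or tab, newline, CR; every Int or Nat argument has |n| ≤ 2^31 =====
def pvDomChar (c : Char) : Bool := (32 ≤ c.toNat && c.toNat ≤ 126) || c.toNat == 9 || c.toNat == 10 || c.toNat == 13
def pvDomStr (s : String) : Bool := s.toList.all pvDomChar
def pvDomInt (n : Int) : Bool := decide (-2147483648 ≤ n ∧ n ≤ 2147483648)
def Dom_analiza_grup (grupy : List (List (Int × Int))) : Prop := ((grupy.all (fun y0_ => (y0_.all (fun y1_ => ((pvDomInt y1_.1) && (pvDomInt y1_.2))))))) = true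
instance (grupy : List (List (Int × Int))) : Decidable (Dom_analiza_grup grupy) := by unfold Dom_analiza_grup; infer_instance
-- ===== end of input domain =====

-- B replaces A's four separate min/max scans per group by one combined fold seeded
-- from the first point, and builds the report by mapping over enumerate (alternative decomposition).


-- ===== PORT A =====
-- for-loop with raport.append; min/max of the generator over a nonempty group = PySem.List.min?/max? (value is Option Int, matching the record type)
def analiza_grup (grupy : List (List (Int × Int))) : List (List (String × Option Int)) :=
  (PySem.List.enumerate grupy).foldl (fun raport ig =>
    if ig.2 ≠ [] then
      raport ++ [[("grupa", some (ig.1 + 1)), ("liczba_prob", some (ig.2.length : Int)),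
                  ("x1_min", PySem.List.min? (ig.2.map Prod.fst) (fun x => x)),
                  ("x1_max", PySem.List.max? (ig.2.map Prod.fst) (fun x => x)),
                  ("x2_min", PySem.List.min? (ig.2.map Prod.snd) (fun x => x)),
                  ("x2_max", PySem.List.max? (ig.2.map Prod.snd) (fun x => x))]]
    else
      raport ++ [[("grupa", some (ig.1 + 1)), ("liczba_prob", some 0),
                  ("x1_min", none), ("x1_max", none), ("x2_min", none), ("x2_max", none)]]) []

-- ===== PORT B =====
-- single combined pass per group, accumulators seeded from the first point
def pvRaportGrupy (nr : Int) (grupa : List (Int × Int)) : List (String × Option Int) :=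
  match grupa with
  | [] => [("grupa", some nr), ("liczba_prob", some 0),
           ("x1_min", none), ("x1_max", none), ("x2_min", none), ("x2_max", none)]
  | p :: rest =>
    let acc := rest.foldl (fun (a : Int × Int × Int × Int) q =>
      (if q.1 < a.1 then q.1 else a.1,
       if q.1 > a.2.1 then q.1 else a.2.1,
       if q.2 < a.2.2.1 then q.2 else a.2.2.1,
       if q.2 > a.2.2.2 then q.2 else a.2.2.2)) (p.1, p.1, p.2, p.2)
    [("grupa", some nr), ("liczba_prob", some ((p :: rest).length : Int)),
     ("x1_min", some acc.1), ("x1_max", some acc.2.1),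
     ("x2_min", some acc.2.2.1), ("x2_max", some acc.2.2.2)]

def analiza_grup_alt (grupy : List (List (Int × Int))) : List (List (String × Option Int)) :=
  (PySem.List.enumerate grupy).map (fun ig => pvRaportGrupy (ig.1 + 1) ig.2)

-- ===== PRECONDITION & SPEC =====
def Spec_analiza_grup (grupy : List (List (Int × Int))) (out : List (List (String × Option Int))) : Prop := out = analiza_grup_alt grupy
instance (grupy : List (List (Int × Int))) (out : List (List (String × Option Int))) : Decidable (Spec_analiza_grup grupy out) := by unfold Spec_analiza_grup; infer_instance

-- ===== CLAIM (what is proved, stated in full; the proofs are below) =====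
def Claim_equal_analiza_grup : Prop := ∀ (grupy : List (List (Int × Int))), Dom_analiza_grup grupy → Spec_analiza_grup grupy (analiza_grup grupy)

-- ===== LEMMAS AND PROOFS =====

lemma pv_if_min (m q : Int) : (if q < m then q else m) = min m q := by
  simp only [min_def]; split_ifs <;> omega

lemma pv_if_max (m q : Int) : (if q > m then q else m) = max m q := by
  simp only [max_def]; split_ifs <;> omega

lemma pv_fold_split (rest : List (Int × Int)) :
    ∀ (a b c d : Int),
    rest.foldl (fun (a : Int × Int × Int × Int) q =>
      (if q.1 < a.1 then q.1 else a.1,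
       if q.1 > a.2.1 then q.1 else a.2.1,
       if q.2 < a.2.2.1 then q.2 else a.2.2.1,
       if q.2 > a.2.2.2 then q.2 else a.2.2.2)) (a, b, c, d)
    = (rest.foldl (fun m q => min m q.1) a,
       rest.foldl (fun m q => max m q.1) b,
       rest.foldl (fun m q => min m q.2) c,
       rest.foldl (fun m q => max m q.2) d) := by
  induction rest with
  | nil => intro a b c d; rfl
  | cons q t ih =>
    intro a b c d
    simp only [List.foldl_cons]
    rw [ih]
    simp only [pv_if_min, pv_if_max]

theorem analiza_grup_spec : Claim_equal_analiza_grup := by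
  intro grupy _
  show analiza_grup grupy = analiza_grup_alt grupy
  unfold analiza_grup analiza_grup_alt
  have h1 := PySem.List.foldl_congr_mem
    (l := PySem.List.enumerate grupy) (init := ([] : List (List (String × Option Int))))
    (f := fun raport (ig : Int × List (Int × Int)) =>
      if ig.2 ≠ [] then
        raport ++ [[("grupa", some (ig.1 + 1)), ("liczba_prob", some (ig.2.length : Int)),
                    ("x1_min", PySem.List.min? (ig.2.map Prod.fst) (fun x => x)),
                    ("x1_max", PySem.List.max? (ig.2.map Prod.fst) (fun x => x)),
                    ("x2_min", PySem.List.min? (ig.2.map Prod.snd) (fun x => x)),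
                    ("x2_max", PySem.List.max? (ig.2.map Prod.snd) (fun x => x))]]
      else
        raport ++ [[("grupa", some (ig.1 + 1)), ("liczba_prob", some 0),
                    ("x1_min", none), ("x1_max", none), ("x2_min", none), ("x2_max", none)]])
    (g := fun raport ig => raport ++ [pvRaportGrupy (ig.1 + 1) ig.2])
    (by
      intro acc ig _
      obtain ⟨i, g⟩ := ig
      cases g with
      | nil => rfl
      | cons p rest =>
        simp only [pvRaportGrupy, ne_eq, reduceCtorEq, not_false_iff, if_true, List.map_cons,
          PySem.List.min?_id_cons, PySem.List.max?_id_cons, pv_fold_split, List.foldl_map])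
  rw [h1, PySem.List.foldl_append_singleton_eq_map, List.nil_append]
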